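-- pv_equiv track=rewrite | github.com/sharad-kr/Routing | routing.py | dik
-- ===== SOURCE A (Python) =====
-- def dik(l): # l is list of 3-sized tuples
--     x=dict()
--     for i in range(len(l)):
--         if not ((min(l[i][0],l[i][1]),max(l[i][0],l[i][1])) in x) :
--             x[(min(l[i][0],l[i][1]),max(l[i][0],l[i][1]))] = l[i][2]
--         else:
--             if l[i][2]>x[(min(l[i][0],l[i][1]),max(l[i][0],l[i][1]))]:
--                 x[(min(l[i][0],l[i][1]),max(l[i][0],l[i][1]))] = l[i][2]
--     return x
-- ===== SOURCE B (Python) =====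
-- def dik(l): # l is list of 3-sized tuples
--     # group-then-reduce: bucket every weight under its normalized pair, then take each bucket's max
--     pairs = [((a, b) if a <= b else (b, a), w) for a, b, w in l]
--     buckets = {}
--     for k, w in pairs:
--         buckets.setdefault(k, []).append(w)
--     return {k: max(ws) for k, ws in buckets.items()}
-- ===== Notes on version B (the rewrite author's own statement) =====
-- stated objective: alternative
-- what changed: Replaced the single compare-and-overwrite-while-scanning loop with a group-then-reduce shape: one pass buckets every weight under its normalized pair via setdefault/append, then a dict comprehension maps each bucket to its max.
import Mathlib
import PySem

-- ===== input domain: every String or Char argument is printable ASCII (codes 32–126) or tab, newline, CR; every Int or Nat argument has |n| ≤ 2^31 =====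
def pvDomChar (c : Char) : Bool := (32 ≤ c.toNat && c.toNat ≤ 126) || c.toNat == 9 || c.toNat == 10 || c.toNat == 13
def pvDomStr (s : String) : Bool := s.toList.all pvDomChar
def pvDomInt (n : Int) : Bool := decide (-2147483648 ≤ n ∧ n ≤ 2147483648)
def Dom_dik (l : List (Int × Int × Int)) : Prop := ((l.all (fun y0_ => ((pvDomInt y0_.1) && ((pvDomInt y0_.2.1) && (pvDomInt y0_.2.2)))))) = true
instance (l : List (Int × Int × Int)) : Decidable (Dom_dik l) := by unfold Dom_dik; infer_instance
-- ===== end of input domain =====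

-- B replaces A's compare-and-overwrite scan by a group-then-reduce shape (bucket all weights per
-- normalized pair, then map each bucket to its max); alternative decomposition, same cost.

-- ===== PORT A =====
-- one loop iteration of A's for-loop (dict keyed by (min,max) pair, kept at the running max)
def dikStep (x : PySem.Dict (Int × Int) Int) (t : Int × Int × Int) : PySem.Dict (Int × Int) Int :=
  let k := (min t.1 t.2.1, max t.1 t.2.1)
  if x.contains k = false then x.insert k t.2.2
  else if t.2.2 > x.getD k 0 then x.insert k t.2.2 else x

def dik (l : List (Int × Int × Int)) : List (Int × Int × Int) :=
  let x := l.foldl dikStep PySem.Dict.empty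
  x.items.map (fun p => (p.1.1, p.1.2, p.2))

-- ===== PORT B =====
-- max(ws): ws is never empty where used, so the .getD 0 default is never taken
def dikMax (ws : List Int) : Int := (PySem.List.max? ws (fun y => y)).getD 0

def dik_alt (l : List (Int × Int × Int)) : List (Int × Int × Int) :=
  let pairs := l.map (fun t => ((if t.1 ≤ t.2.1 then (t.1, t.2.1) else (t.2.1, t.1)), t.2.2))
  let buckets := pairs.foldl (fun d p => d.modify p.1 [] (· ++ [p.2])) PySem.Dict.empty
  buckets.items.map (fun q => (q.1.1, q.1.2, dikMax q.2))

-- ===== PRECONDITION & SPEC =====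
def Spec_dik (l : List (Int × Int × Int)) (out : List (Int × Int × Int)) : Prop := out = dik_alt l
instance (l : List (Int × Int × Int)) (out : List (Int × Int × Int)) : Decidable (Spec_dik l out) := by unfold Spec_dik; infer_instance

-- ===== CLAIM (what is proved, stated in full; the proofs are below) =====
def Claim_equal_dik : Prop := ∀ (l : List (Int × Int × Int)), Dom_dik l → Spec_dik l (dik l)

-- ===== LEMMAS AND PROOFS =====

def dikKey (t : Int × Int × Int) : Int × Int := (min t.1 t.2.1, max t.1 t.2.1)

theorem dikKey_eq_if (t : Int × Int × Int) :
    (if t.1 ≤ t.2.1 then (t.1, t.2.1) else (t.2.1, t.1)) = dikKey t := by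
  simp only [dikKey, min_def, max_def]
  split_ifs <;> rfl

-- keys of A's fold: every step adds the key if fresh (Set.add), so the fold is Set.update
theorem dik_keys_step (x : PySem.Dict (Int × Int) Int) (t : Int × Int × Int) :
    (dikStep x t).keys = PySem.Set.add x.keys (dikKey t) := by
  have hk : ((min t.1 t.2.1, max t.1 t.2.1) : Int × Int) = dikKey t := rfl
  simp only [dikStep, hk, PySem.Set.add]
  by_cases h : x.contains (dikKey t) = true
  · have hmem : PySem.Set.contains x.keys (dikKey t) = true := by
      show x.keys.contains (dikKey t) = true
      rw [List.contains_iff_mem]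
      exact (PySem.Dict.contains_iff_mem_keys x _).mp h
    rw [if_neg (by simp [h]), if_pos hmem]
    split_ifs
    · exact PySem.Dict.keys_insert_of_contains x _ h
    · rfl
  · have h' : x.contains (dikKey t) = false := by simpa using h
    have hmem : ¬ PySem.Set.contains x.keys (dikKey t) = true := by
      show ¬ x.keys.contains (dikKey t) = true
      rw [List.contains_iff_mem]
      intro hm
      rw [(PySem.Dict.contains_iff_mem_keys x _).mpr hm] at h'
      simp at h'
    rw [if_pos h', if_neg hmem]
    exact PySem.Dict.keys_insert_of_not_contains x _ h'

theorem dik_keys_foldl (l : List (Int × Int × Int)) (x : PySem.Dict (Int × Int) Int) :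
    (l.foldl dikStep x).keys = PySem.Set.update x.keys (l.map dikKey) := by
  induction l generalizing x with
  | nil => rfl
  | cons t rest ih =>
    simp only [List.foldl_cons, List.map_cons, PySem.Set.update, List.foldl_cons]
    rw [ih, dik_keys_step]
    rfl

theorem dik_nodup_keys (l : List (Int × Int × Int)) :
    (l.foldl dikStep (PySem.Dict.empty : PySem.Dict (Int × Int) Int)).keys.Nodup := by
  rw [dik_keys_foldl, PySem.Dict.keys_empty]
  exact PySem.Set.nodup_update _ _ List.nodup_nil

-- A's lookup after the fold: a running max over the weights filed under k, seeded by the old entry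
def dikRun (o : Option Int) (ws : List Int) : Option Int :=
  ws.foldl (fun o w => match o with | none => some w | some v => some (if w > v then w else v)) o

theorem dik_get?_step (x : PySem.Dict (Int × Int) Int) (t : Int × Int × Int) (k : Int × Int) :
    (dikStep x t).get? k =
      if dikKey t = k then
        (match x.get? k with | none => some t.2.2 | some v => some (if t.2.2 > v then t.2.2 else v))
      else x.get? k := by
  have hk : ((min t.1 t.2.1, max t.1 t.2.1) : Int × Int) = dikKey t := rfl
  simp only [dikStep, hk]
  by_cases hkk : dikKey t = k
  · subst hkk
    simp only [if_true]
    cases hg : x.get? (dikKey t) with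
    | none =>
      have hc : x.contains (dikKey t) = false := (PySem.Dict.get?_eq_none_iff_contains x _).mp hg
      simp [hc]
    | some v =>
      have hc : x.contains (dikKey t) = true := by
        rcases Bool.eq_false_or_eq_true (x.contains (dikKey t)) with h | h
        · exact h
        · rw [(PySem.Dict.get?_eq_none_iff_contains x _).mpr h] at hg; cases hg
      have hd : x.getD (dikKey t) 0 = v := by rw [PySem.Dict.getD_eq_get?_getD, hg]; rfl
      simp only [hc, Bool.true_eq_false, if_false, hd]
      split_ifs with hw
      · simp
      · rw [hg]
  · simp only [if_neg hkk]
    split_ifs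
    · rw [PySem.Dict.get?_insert, if_neg (Ne.symm hkk)]
    · rw [PySem.Dict.get?_insert, if_neg (Ne.symm hkk)]
    · rfl

theorem dik_get?_foldl (l : List (Int × Int × Int)) (x : PySem.Dict (Int × Int) Int) (k : Int × Int) :
    (l.foldl dikStep x).get? k = dikRun (x.get? k) ((l.filter (fun t => dikKey t == k)).map (fun t => t.2.2)) := by
  induction l generalizing x with
  | nil => rfl
  | cons t rest ih =>
    simp only [List.foldl_cons, List.filter_cons]
    by_cases hkk : dikKey t = k
    · simp only [hkk, beq_self_eq_true, if_true, List.map_cons]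
      rw [ih, dik_get?_step, if_pos hkk]
      rfl
    · have : (dikKey t == k) = false := beq_eq_false_iff_ne.mpr hkk
      simp only [this, Bool.false_eq_true, if_false]
      rw [ih, dik_get?_step, if_neg hkk]

theorem dikRun_some_max (v : Int) (ws : List Int) :
    dikRun (some v) ws = some (ws.foldl max v) := by
  induction ws generalizing v with
  | nil => rfl
  | cons w rest ih =>
    show dikRun (some (if w > v then w else v)) rest = some ((w :: rest).foldl max v)
    have hmax : (if w > v then w else v) = max v w := by
      simp only [max_def]; split_ifs <;> omega
    rw [hmax, List.foldl_cons, ih]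

theorem dikRun_none_eq_max (ws : List Int) (h : ws ≠ []) :
    dikRun none ws = some (dikMax ws) := by
  cases ws with
  | nil => exact absurd rfl h
  | cons w rest =>
    have : dikRun none (w :: rest) = dikRun (some w) rest := rfl
    rw [this, dikRun_some_max, dikMax, PySem.List.max?_id_cons]
    rfl

theorem dik_spec_aux (l : List (Int × Int × Int)) : dik l = dik_alt l := by
  have hpairs : (l.map (fun t => ((if t.1 ≤ t.2.1 then (t.1, t.2.1) else (t.2.1, t.1)), t.2.2)))
      = l.map (fun t => (dikKey t, t.2.2)) := by
    apply List.map_congr_left; intro t _; rw [dikKey_eq_if]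
  simp only [dik, dik_alt, hpairs]
  set A := l.foldl dikStep PySem.Dict.empty with hA
  set B := (l.map (fun t => (dikKey t, t.2.2))).foldl
      (fun d p => d.modify p.1 [] (· ++ [p.2])) PySem.Dict.empty with hB
  have hKA : A.keys = PySem.Set.update [] (l.map dikKey) := by
    rw [hA, dik_keys_foldl, PySem.Dict.keys_empty]
  have hKB : B.keys = PySem.Set.update [] (l.map dikKey) := by
    have h := PySem.Dict.keys_foldl_modify_key (l.map (fun t => (dikKey t, t.2.2)))
      Prod.fst ([] : List Int) (fun _ p v => v ++ [p.2]) PySem.Dict.empty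
    rw [PySem.Dict.keys_empty, List.map_map] at h
    exact h
  have hNA : A.keys.Nodup := dik_nodup_keys l
  have hNB : B.keys.Nodup := by rw [hKB]; exact PySem.Set.nodup_update _ _ List.nodup_nil
  rw [PySem.Dict.items_eq_map_keys A hNA 0, PySem.Dict.items_eq_map_keys B hNB [],
      hKA, hKB, List.map_map, List.map_map]
  apply List.map_congr_left
  intro k hk
  have hkmem : k ∈ l.map dikKey := by
    rcases (PySem.Set.mem_update ([] : PySem.Set (Int × Int)) (l.map dikKey) k).mp hk with h | h
    · cases h
    · exact h
  obtain ⟨t, ht, hkt⟩ := List.mem_map.mp hkmem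
  have htf : t ∈ l.filter (fun t => dikKey t == k) := List.mem_filter.mpr ⟨ht, by simp [hkt]⟩
  have hne : (l.filter (fun t => dikKey t == k)).map (fun t => t.2.2) ≠ [] :=
    List.ne_nil_of_mem (List.mem_map_of_mem htf)
  have hBget : B.getD k [] = (l.filter (fun t => dikKey t == k)).map (fun t => t.2.2) := by
    have h := PySem.Dict.getD_foldl_modify_append (l.map (fun t => (dikKey t, t.2.2)))
      (PySem.Dict.empty : PySem.Dict (Int × Int) (List Int)) k
    rw [PySem.Dict.getD_empty, List.nil_append, List.filter_map, List.map_map] at h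
    exact h
  have hAget : A.get? k = some (dikMax ((l.filter (fun t => dikKey t == k)).map (fun t => t.2.2))) := by
    rw [hA, dik_get?_foldl, PySem.Dict.get?_empty, dikRun_none_eq_max _ hne]
  have hAgetD : A.getD k 0 = dikMax ((l.filter (fun t => dikKey t == k)).map (fun t => t.2.2)) := by
    rw [PySem.Dict.getD_eq_get?_getD, hAget]; rfl
  simp only [Function.comp, hAgetD, hBget]

-- ===== VERDICT (by name: the statement is the Claim_ definition above) =====
theorem dik_spec : Claim_equal_dik := by
  intro l _
  exact dik_spec_aux l
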